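-- pv_equiv track=rewrite | github.com/SimonRoG/probability_models | prob1.py | calculate_frequency_table
-- ===== SOURCE A (Python) =====
-- def calculate_frequency_table(data):
--     freq_dict = {}
--     for value in data:
--         if value in freq_dict:
--             freq_dict[value] += 1
--         else:
--             freq_dict[value] = 1
--
--     sorted_values = []
--     for value in freq_dict:
--         sorted_values.append(value)
--
--     sorted_values.sort()
--
--     freq_table = []
--     cumulative_freq = 0
--
--     for value in sorted_values:
--         frequency = freq_dict[value]
--         cumulative_freq += frequency
--         freq_table.append((value, frequency, cumulative_freq))
--
--     return freq_table
-- ===== SOURCE B (Python) =====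
-- def calculate_frequency_table(data):
--     s = sorted(data)
--     n = len(s)
--     table = []
--     i = 0
--     while i < n:
--         v = s[i]
--         j = i + 1
--         while j < n and s[j] == v:
--             j += 1
--         table.append((v, j - i, j))
--         i = j
--     return table
-- ===== Notes on version B (the rewrite author's own statement) =====
-- stated objective: alternative
-- what changed: B builds no frequency dict: it sorts a copy of the input once and walks the sorted list by index counting runs of equal adjacent values, emitting (value, run length, running total = end index of the run) per run.
import Mathlib
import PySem

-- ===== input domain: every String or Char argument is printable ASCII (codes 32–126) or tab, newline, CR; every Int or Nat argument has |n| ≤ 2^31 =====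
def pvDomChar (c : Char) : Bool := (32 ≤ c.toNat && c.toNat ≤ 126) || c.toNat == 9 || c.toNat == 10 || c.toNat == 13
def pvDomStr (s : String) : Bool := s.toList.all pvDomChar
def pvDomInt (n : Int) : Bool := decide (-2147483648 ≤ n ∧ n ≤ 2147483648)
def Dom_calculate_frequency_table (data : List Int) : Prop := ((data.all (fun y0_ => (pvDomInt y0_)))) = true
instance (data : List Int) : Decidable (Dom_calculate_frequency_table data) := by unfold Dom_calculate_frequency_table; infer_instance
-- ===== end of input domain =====

-- B replaces A's frequency dict by one sort followed by a run-length walk over the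
-- sorted data (alternative algorithm of the same cost); return values proved equal.

-- ===== PORT A =====
def calculate_frequency_table (data : List Int) : List (Int × Int × Int) :=
  let freq_dict := data.foldl (fun d value =>
      if d.contains value then d.insert value (d.getD value 0 + 1)  -- freq_dict[value] += 1 (key present, so getD is exact)
      else d.insert value 1) PySem.Dict.empty
  let sorted_values := freq_dict.keys.foldl (fun acc value => acc ++ [value]) []
  let sorted_values := PySem.List.sorted sorted_values (fun x => x) false
  (sorted_values.foldl (fun (st : List (Int × Int × Int) × Int) value =>
      (st.1 ++ [(value, freq_dict.getD value 0, st.2 + freq_dict.getD value 0)],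
       st.2 + freq_dict.getD value 0)) ([], 0)).1   -- freq_dict[value]: key present, so getD is exact

-- ===== PORT B =====
-- Source B walks the sorted list s by index: the inner while-loop advances j over the run of
-- values equal to s[i]. Here the yet-unprocessed suffix s[i:] is the recursion argument:
-- the run scan 'j - i' is 1 + length of takeWhile, 'i = j' is dropWhile, and cum (the
-- length of the consumed prefix, = j) is the third component, exactly as Source B appends j.
def pvRuns (s : List Int) (cum : Int) : List (Int × Int × Int) :=
  match s with
  | [] => []
  | v :: rest =>
      let run : Int := 1 + (rest.takeWhile (fun y => y == v)).length
      (v, run, cum + run) :: pvRuns (rest.dropWhile (fun y => y == v)) (cum + run)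
termination_by s.length
decreasing_by
  simp only [List.length_cons]
  exact Nat.lt_succ_of_le (List.Sublist.length_le (List.dropWhile_sublist _))

def calculate_frequency_table_alt (data : List Int) : List (Int × Int × Int) :=
  pvRuns (PySem.List.sorted data (fun x => x) false) 0

-- ===== PRECONDITION & SPEC =====
def Spec_calculate_frequency_table (data : List Int) (out : List (Int × Int × Int)) : Prop := out = calculate_frequency_table_alt data
instance (data : List Int) (out : List (Int × Int × Int)) : Decidable (Spec_calculate_frequency_table data out) := by unfold Spec_calculate_frequency_table; infer_instance

-- ===== CLAIM (what is proved, stated in full; the proofs are below) =====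
def Claim_equal_calculate_frequency_table : Prop := ∀ (data : List Int), Dom_calculate_frequency_table data → Spec_calculate_frequency_table data (calculate_frequency_table data)

-- ===== LEMMAS AND PROOFS =====

-- cumulative table over a key list with a fixed frequency function
def pvCumTable (f : Int → Int) : List Int → Int → List (Int × Int × Int)
  | [], _ => []
  | v :: ks, c => (v, f v, c + f v) :: pvCumTable f ks (c + f v)

lemma pvCumTable_congr (f g : Int → Int) (ks : List Int) (c : Int)
    (h : ∀ v ∈ ks, f v = g v) : pvCumTable f ks c = pvCumTable g ks c := by
  induction ks generalizing c with
  | nil => rfl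
  | cons v ks ih =>
      have hv : f v = g v := h v (by simp)
      simp only [pvCumTable, hv]
      exact congrArg _ (ih _ (fun x hx => h x (List.mem_cons_of_mem _ hx)))

-- A's counting loop is the Counter fold
lemma pvFreqDict_eq (data : List Int) :
    data.foldl (fun d value =>
      if d.contains value then d.insert value (d.getD value 0 + 1)
      else d.insert value 1) PySem.Dict.empty = PySem.Dict.counter data := by
  have h : (fun (d : PySem.Dict Int Int) value =>
      if d.contains value then d.insert value (d.getD value 0 + 1)
      else d.insert value 1) = fun d value => d.insert value (d.getD value 0 + 1) := by
    funext d value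
    by_cases h : d.contains value = true
    · simp [h]
    · simp only [h, if_neg Bool.false_ne_true,
        PySem.Dict.getD_of_not_contains d 0 (by simpa using h)]
      norm_num
  rw [h, PySem.Dict.foldl_insert_getD_add_one_eq_counter]

-- A's output loop builds pvCumTable
lemma pvFoldl_cumTable (f : Int → Int) (ks : List Int) (acc : List (Int × Int × Int)) (c : Int) :
    (ks.foldl (fun (st : List (Int × Int × Int) × Int) value =>
      (st.1 ++ [(value, f value, st.2 + f value)], st.2 + f value)) (acc, c)).1
    = acc ++ pvCumTable f ks c := by
  induction ks generalizing acc c with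
  | nil => simp [pvCumTable]
  | cons v ks ih => simp [List.foldl_cons, ih, pvCumTable]

-- decomposition facts at the head of a sorted list
lemma pvSortedHead (v : Int) (rest : List Int)
    (hle : ∀ x ∈ rest, v ≤ x) (hp : rest.Pairwise (· ≤ ·)) :
    (rest.takeWhile (fun y => y == v)).length = rest.count v ∧
    (∀ x ∈ rest.dropWhile (fun y => y == v), v < x) := by
  induction rest with
  | nil => simp
  | cons y t ih =>
      have hyv : v ≤ y := hle y (by simp)
      have hyt : ∀ x ∈ t, y ≤ x := (List.pairwise_cons.mp hp).1
      by_cases hy : y = v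
      · subst hy
        have := ih (fun x hx => hle x (List.mem_cons_of_mem _ hx)) (List.pairwise_cons.mp hp).2
        simp only [List.takeWhile_cons, BEq.rfl, if_true, List.dropWhile_cons,
          List.length_cons, List.count_cons_self]
        exact ⟨by omega, this.2⟩
      · have hvy : v < y := lt_of_le_of_ne hyv (fun h => hy h.symm)
        have hnot : v ∉ y :: t := by
          intro h
          rcases List.mem_cons.mp h with h | h
          · exact hy h.symm
          · exact absurd (hyt v h) (not_le.mpr hvy)
        have hyb : (y == v) = false := by simpa using hy
        constructor
        · simp [hyb, List.count_eq_zero.mpr hnot]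
        · intro x hx
          rw [List.dropWhile_cons, hyb] at hx
          simp only [Bool.false_eq_true, if_false] at hx
          rcases List.mem_cons.mp hx with h | h
          · exact h ▸ hvy
          · exact lt_of_lt_of_le hvy (hyt x h)

-- pushing a fresh head through the Set.add fold
lemma pvFoldlAdd_cons (v : Int) (dw : List Int) (hv : v ∉ dw) :
    ∀ s : List Int, dw.foldl PySem.Set.add (v :: s) = v :: dw.foldl PySem.Set.add s := by
  induction dw with
  | nil => intro s; rfl
  | cons x t ih =>
      intro s
      have hxv : x ≠ v := fun h => hv (by simp [h])
      have hadd : PySem.Set.add (v :: s) x = v :: PySem.Set.add s x := by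
        by_cases hm : x ∈ s
        · simp [PySem.Set.add, PySem.Set.contains, hxv, hm]
        · simp [PySem.Set.add, PySem.Set.contains, hxv, hm]
      simp only [List.foldl_cons, hadd]
      exact ih (fun h => hv (List.mem_cons_of_mem _ h)) _

-- dedup of a list starting with a run of equal values
lemma pvDedupBlock (v : Int) (tw dw : List Int) (htw : ∀ x ∈ tw, x = v) (hdw : v ∉ dw) :
    PySem.List.dedup (v :: (tw ++ dw)) = v :: PySem.List.dedup dw := by
  rw [PySem.List.dedup_eq_ofList, PySem.List.dedup_eq_ofList,
    PySem.Set.ofList_eq_foldl, PySem.Set.ofList_eq_foldl]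
  have h1 : PySem.Set.add ([] : List Int) v = [v] := rfl
  have h2 : tw.foldl PySem.Set.add [v] = [v] := by
    induction tw with
    | nil => rfl
    | cons x t ih =>
        have hx : x = v := htw x (by simp)
        subst hx
        have : PySem.Set.add [x] x = [x] := by simp [PySem.Set.add, PySem.Set.contains]
        simp only [List.foldl_cons, this]
        exact ih (fun y hy => htw y (List.mem_cons_of_mem _ hy))
  simp only [List.foldl_cons, List.foldl_append, h1, h2]
  exact pvFoldlAdd_cons v dw hdw []

-- B on a sorted list is pvCumTable of its counts over its dedup
lemma pvRuns_eq_cumTable_aux (n : Nat) : ∀ (l : List Int), l.length ≤ n → l.Pairwise (· ≤ ·) →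
    ∀ c, pvRuns l c = pvCumTable (fun v => (l.count v : Int)) (PySem.List.dedup l) c := by
  induction n with
  | zero =>
      intro l hl _ c
      have : l = [] := List.eq_nil_of_length_eq_zero (Nat.le_zero.mp hl)
      subst this
      simp [pvRuns, PySem.List.dedup, PySem.Set.ofList, pvCumTable]
  | succ n ihn =>
      intro l hl h c
      match l with
      | [] => simp [pvRuns, PySem.List.dedup, PySem.Set.ofList, pvCumTable]
      | v :: rest =>
        have hle : ∀ x ∈ rest, v ≤ x := (List.pairwise_cons.mp h).1
        have hp : rest.Pairwise (· ≤ ·) := (List.pairwise_cons.mp h).2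
        obtain ⟨hlen, hdw⟩ := pvSortedHead v rest hle hp
        have hsplit : rest = rest.takeWhile (fun y => y == v) ++ rest.dropWhile (fun y => y == v) :=
          (List.takeWhile_append_dropWhile).symm
        have htw : ∀ x ∈ rest.takeWhile (fun y => y == v), x = v := by
          intro x hx; simpa using List.mem_takeWhile_imp hx
        have hvd : v ∉ rest.dropWhile (fun y => y == v) := fun hx => lt_irrefl v (hdw v hx)
        have hdedup : PySem.List.dedup (v :: rest)
            = v :: PySem.List.dedup (rest.dropWhile (fun y => y == v)) := by
          conv_lhs => rw [hsplit]
          exact pvDedupBlock v _ _ htw hvd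
        have hcount : ((v :: rest).count v : Int) = 1 + (rest.takeWhile (fun y => y == v)).length := by
          rw [List.count_cons_self, hlen]; push_cast; ring
        have hpdw : (rest.dropWhile (fun y => y == v)).Pairwise (· ≤ ·) :=
          hp.sublist (List.dropWhile_sublist _)
        have hcongr : ∀ k ∈ PySem.List.dedup (rest.dropWhile (fun y => y == v)),
            ((rest.dropWhile (fun y => y == v)).count k : Int) = ((v :: rest).count k : Int) := by
          intro k hk
          have hkdw : k ∈ rest.dropWhile (fun y => y == v) := (PySem.List.mem_dedup _ _).mp hk
          have hkv : v < k := hdw k hkdw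
          have hktw : k ∉ rest.takeWhile (fun y => y == v) := by
            intro hx; exact absurd (htw k hx) (by intro h'; exact lt_irrefl v (h' ▸ hkv))
          have hc : rest.count k = (rest.dropWhile (fun y => y == v)).count k := by
            conv_lhs => rw [hsplit]
            rw [List.count_append, List.count_eq_zero.mpr hktw, Nat.zero_add]
          rw [List.count_cons_of_ne (by intro h'; exact lt_irrefl v (h' ▸ hkv)), hc]
        have hdlen : (rest.dropWhile (fun y => y == v)).length ≤ n := by
          have h1 : (rest.dropWhile (fun y => y == v)).length ≤ rest.length :=
            List.Sublist.length_le (List.dropWhile_sublist _)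
          have h2 : rest.length + 1 ≤ n + 1 := by simpa using hl
          omega
        rw [pvRuns, hdedup]
        simp only [pvCumTable]
        rw [← hcount]
        refine congrArg _ ?_
        rw [ihn _ hdlen hpdw _]
        exact pvCumTable_congr _ _ _ _ hcongr

lemma pvRuns_eq_cumTable (l : List Int) (h : l.Pairwise (· ≤ ·)) (c : Int) :
    pvRuns l c = pvCumTable (fun v => (l.count v : Int)) (PySem.List.dedup l) c :=
  pvRuns_eq_cumTable_aux l.length l le_rfl h c

-- dedup of a sorted list is strictly increasing
lemma pvDedupSorted_lt_aux (n : Nat) : ∀ (l : List Int), l.length ≤ n → l.Pairwise (· ≤ ·) →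
    (PySem.List.dedup l).Pairwise (· < ·) := by
  induction n with
  | zero =>
      intro l hl _
      have : l = [] := List.eq_nil_of_length_eq_zero (Nat.le_zero.mp hl)
      subst this
      simp [PySem.List.dedup, PySem.Set.ofList]
  | succ n ihn =>
      intro l hl h
      match l with
      | [] => simp [PySem.List.dedup, PySem.Set.ofList]
      | v :: rest =>
        have hle : ∀ x ∈ rest, v ≤ x := (List.pairwise_cons.mp h).1
        have hp : rest.Pairwise (· ≤ ·) := (List.pairwise_cons.mp h).2
        obtain ⟨_, hdw⟩ := pvSortedHead v rest hle hp
        have htw : ∀ x ∈ rest.takeWhile (fun y => y == v), x = v := by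
          intro x hx; simpa using List.mem_takeWhile_imp hx
        have hvd : v ∉ rest.dropWhile (fun y => y == v) := fun hx => lt_irrefl v (hdw v hx)
        have hdedup : PySem.List.dedup (v :: rest)
            = v :: PySem.List.dedup (rest.dropWhile (fun y => y == v)) := by
          conv_lhs => rw [(List.takeWhile_append_dropWhile
            (p := fun y => y == v) (l := rest)).symm]
          exact pvDedupBlock v _ _ htw hvd
        have hdlen : (rest.dropWhile (fun y => y == v)).length ≤ n := by
          have h1 : (rest.dropWhile (fun y => y == v)).length ≤ rest.length :=
            List.Sublist.length_le (List.dropWhile_sublist _)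
          have h2 : rest.length + 1 ≤ n + 1 := by simpa using hl
          omega
        rw [hdedup, List.pairwise_cons]
        exact ⟨fun k hk => hdw k ((PySem.List.mem_dedup _ _).mp hk),
          ihn _ hdlen (hp.sublist (List.dropWhile_sublist _))⟩

lemma pvDedupSorted_lt (l : List Int) (h : l.Pairwise (· ≤ ·)) :
    (PySem.List.dedup l).Pairwise (· < ·) :=
  pvDedupSorted_lt_aux l.length l le_rfl h

-- sorting the distinct values equals dedup of the sorted data
lemma pvSortedSet_eq_dedupSorted (data : List Int) :
    PySem.List.sorted (PySem.Set.ofList data) (fun x => x) false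
      = PySem.List.dedup (PySem.List.sorted data (fun x => x) false) := by
  have hsp : (PySem.List.sorted data (fun x => x) false).Pairwise (· ≤ ·) := by
    simpa using PySem.List.sorted_pairwise data (fun x => x)
  apply PySem.List.sorted_eq_of_perm_of_pairwise_lt
  · apply (List.perm_ext_iff_of_nodup (PySem.List.nodup_dedup _) (PySem.Set.nodup_ofList _)).mpr
    intro x
    rw [PySem.List.mem_dedup, PySem.List.mem_sorted, PySem.Set.mem_ofList]
  · simpa using pvDedupSorted_lt _ hsp

-- ===== VERDICT (by name: the statement is the Claim_ definition above) =====
theorem calculate_frequency_table_spec : Claim_equal_calculate_frequency_table := by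
  intro data _
  unfold Spec_calculate_frequency_table calculate_frequency_table calculate_frequency_table_alt
  simp only [pvFreqDict_eq, PySem.Dict.keys_counter, PySem.List.foldl_append_singleton_eq_self,
    List.nil_append]
  rw [pvFoldl_cumTable (fun v => (PySem.Dict.counter data).getD v 0)]
  have hf : (fun v => (PySem.Dict.counter data).getD v 0)
      = fun v => ((PySem.List.sorted data (fun x => x) false).count v : Int) := by
    funext v
    rw [PySem.Dict.getD_counter]
    exact_mod_cast congrArg (Nat.cast (R := Int))
      ((PySem.List.sorted_perm data (fun x => x) false).count_eq v).symm
  have hsp : (PySem.List.sorted data (fun x => x) false).Pairwise (· ≤ ·) := by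
    simpa using PySem.List.sorted_pairwise data (fun x => x)
  rw [hf, pvSortedSet_eq_dedupSorted, List.nil_append,
    pvRuns_eq_cumTable _ hsp 0]
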